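-- pv_equiv track=rewrite | github.com/MemTensor/HaluMem | scripts/stage3_2_skeleton2routine.py | group_events_by_preference_type
-- ===== SOURCE A (Python) =====
-- from typing import Dict, List, Tuple
--
-- def group_events_by_preference_type(events: List[Dict]) -> Dict[str, List[Dict]]:
--     """Group events by preference type"""
--     grouped_events = {}
--     for event in events:
--         pref_type = event.get('preference_type')
--         if pref_type is None:
--             raise ValueError(f"Preference event missing 'preference_type': {event}")
--         if pref_type not in grouped_events:
--             grouped_events[pref_type] = []
--         grouped_events[pref_type].append(event)
--     return grouped_events
-- ===== SOURCE B (Python) =====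
-- from typing import Dict, List
--
--
-- def group_events_by_preference_type(events: List[Dict]) -> Dict[str, List[Dict]]:
--     """Group events by preference type"""
--     for event in events:
--         if event.get('preference_type') is None:
--             raise ValueError(f"Preference event missing 'preference_type': {event}")
--     keys = list(dict.fromkeys(event['preference_type'] for event in events))
--     return {k: [e for e in events if e['preference_type'] == k] for k in keys}
-- ===== Notes on version B (the rewrite author's own statement) =====
-- stated objective: alternative
-- what changed: Replaces A's single accumulation loop over a mutable dict with a validate-then-dedup-keys-then-per-key-filter comprehension: the keys in first-occurrence order are computed once with dict.fromkeys and each group is a filter of the event list.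
import Mathlib
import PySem

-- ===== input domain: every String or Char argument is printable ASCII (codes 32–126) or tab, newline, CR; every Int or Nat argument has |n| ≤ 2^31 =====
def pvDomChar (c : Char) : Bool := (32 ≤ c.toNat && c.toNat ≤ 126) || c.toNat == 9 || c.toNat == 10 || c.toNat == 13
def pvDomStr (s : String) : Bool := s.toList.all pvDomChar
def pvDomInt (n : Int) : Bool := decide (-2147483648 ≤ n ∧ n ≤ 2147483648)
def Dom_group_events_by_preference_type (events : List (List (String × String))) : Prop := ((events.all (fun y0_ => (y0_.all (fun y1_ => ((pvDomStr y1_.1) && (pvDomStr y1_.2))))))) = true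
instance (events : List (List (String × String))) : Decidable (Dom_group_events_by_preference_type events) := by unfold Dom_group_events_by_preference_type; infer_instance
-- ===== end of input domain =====

-- B replaces A's single accumulation loop over a mutable dict by a validation pass, an
-- ordered dedup of the keys, and one filter pass per distinct key (alternative algorithm, not claimed faster).


-- ===== PORT A =====
-- one iteration of A's loop body (pref_type already extracted as k)
def pvStepA (acc : PySem.Dict String (List (List (String × String)))) (k : String)
    (e : List (String × String)) : PySem.Dict String (List (List (String × String))) :=
  let acc1 := if acc.contains k then acc else acc.insert k []
  acc1.modify k [] (· ++ [e])

def pvLoopA : List (List (String × String)) → PySem.Dict String (List (List (String × String))) →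
    PySem.Dict String (List (List (String × String)))
  | [], acc => acc
  | e :: rest, acc =>
    match (PySem.Dict.ofList e).get? "preference_type" with
    | none => acc   -- Python raises ValueError here (excluded by Pre_)
    | some k => pvLoopA rest (pvStepA acc k e)

def group_events_by_preference_type (events : List (List (String × String))) : List (String × List (List (String × String))) :=
  (pvLoopA events PySem.Dict.empty).items

-- ===== PORT B =====
-- event['preference_type'] (total form; only used after validation guarantees the key exists)
def pvKeyB (e : List (String × String)) : String :=
  ((PySem.Dict.ofList e).get? "preference_type").getD ""

def group_events_by_preference_type_alt (events : List (List (String × String))) : List (String × List (List (String × String))) :=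
  if events.all (fun e => ((PySem.Dict.ofList e).get? "preference_type").isSome) then
    (PySem.List.dedup (events.map pvKeyB)).map
      (fun k => (k, events.filter (fun e => pvKeyB e == k)))
  else []   -- Python raises ValueError here (excluded by Pre_)

-- ===== PRECONDITION & SPEC =====
-- Pre_ excludes exactly the inputs on which A (and B) raise ValueError: an event without key 'preference_type'.
def Pre_group_events_by_preference_type (events : List (List (String × String))) : Prop :=
  ∀ e ∈ events, (PySem.Dict.ofList e).contains "preference_type" = true
instance (events : List (List (String × String))) : Decidable (Pre_group_events_by_preference_type events) := by unfold Pre_group_events_by_preference_type; infer_instance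

def pvWitness_group_events_by_preference_type : (List (List (String × String))) :=
  [[("preference_type", "explicit")], [("preference_type", "implicit"), ("v", "1")]]

def Spec_group_events_by_preference_type (events : List (List (String × String))) (out : List (String × List (List (String × String)))) : Prop := out = group_events_by_preference_type_alt events
instance (events : List (List (String × String))) (out : List (String × List (List (String × String)))) : Decidable (Spec_group_events_by_preference_type events out) := by unfold Spec_group_events_by_preference_type; infer_instance

-- ===== CLAIM (what is proved, stated in full; the proofs are below) =====
def Claim_equal_group_events_by_preference_type : Prop := ∀ (events : List (List (String × String))), Dom_group_events_by_preference_type events → Pre_group_events_by_preference_type events → Spec_group_events_by_preference_type events (group_events_by_preference_type events)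

-- ===== LEMMAS AND PROOFS =====

theorem pvStepA_getD (acc : PySem.Dict String (List (List (String × String)))) (k j : String)
    (e : List (String × String)) :
    (pvStepA acc k e).getD j [] = acc.getD j [] ++ (if k = j then [e] else []) := by
  unfold pvStepA
  by_cases hc : acc.contains k = true
  · simp only [hc, if_true, PySem.Dict.getD_modify]
    by_cases hj : j = k
    · subst hj; simp
    · simp [hj, Ne.symm hj]
  · simp only [Bool.not_eq_true] at hc
    simp only [hc, Bool.false_eq_true, if_false, PySem.Dict.getD_modify]
    by_cases hj : j = k
    · subst hj
      simp [PySem.Dict.getD_of_not_contains acc _ hc]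
    · simp [hj, Ne.symm hj, PySem.Dict.getD_insert]

theorem pvStepA_keys (acc : PySem.Dict String (List (List (String × String)))) (k : String)
    (e : List (String × String)) :
    (pvStepA acc k e).keys = PySem.Set.add acc.keys k := by
  unfold pvStepA
  by_cases hc : acc.contains k = true
  · simp only [hc, if_true]
    rw [PySem.Dict.keys_modify, PySem.Dict.keys_insert_of_contains _ _ hc,
      PySem.Set.add_of_mem ((PySem.Dict.contains_iff_mem_keys acc k).mp hc)]
  · simp only [Bool.not_eq_true] at hc
    simp only [hc, Bool.false_eq_true, if_false]
    rw [PySem.Dict.keys_modify,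
      PySem.Dict.keys_insert_of_contains _ _ (PySem.Dict.contains_insert_self acc k []),
      PySem.Dict.keys_insert_of_not_contains _ _ hc,
      PySem.Set.add_of_not_mem
        (fun hm => absurd ((PySem.Dict.contains_iff_mem_keys acc k).mpr hm) (by simp [hc]))]

theorem pvLoopA_getD (l : List (List (String × String)))
    (acc : PySem.Dict String (List (List (String × String)))) (j : String)
    (h : ∀ e ∈ l, (PySem.Dict.ofList e).contains "preference_type" = true) :
    (pvLoopA l acc).getD j [] = acc.getD j [] ++ l.filter (fun e => pvKeyB e == j) := by
  induction l generalizing acc with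
  | nil => simp [pvLoopA]
  | cons e rest ih =>
    have hs : ((PySem.Dict.ofList e).get? "preference_type").isSome := by
      rw [← PySem.Dict.contains_eq_isSome_get?]; exact h e (List.mem_cons_self ..)
    obtain ⟨v, hv⟩ := Option.isSome_iff_exists.mp hs
    have hkey : pvKeyB e = v := by simp [pvKeyB, hv]
    simp only [pvLoopA, hv]
    rw [ih _ (fun x hx => h x (List.mem_cons_of_mem _ hx)), pvStepA_getD]
    by_cases hj : v = j
    · simp [hkey, hj]
    · simp [hkey, hj]

theorem pvLoopA_keys (l : List (List (String × String)))
    (acc : PySem.Dict String (List (List (String × String))))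
    (h : ∀ e ∈ l, (PySem.Dict.ofList e).contains "preference_type" = true) :
    (pvLoopA l acc).keys = PySem.Set.update acc.keys (l.map pvKeyB) := by
  induction l generalizing acc with
  | nil => simp [pvLoopA, PySem.Set.update]
  | cons e rest ih =>
    have hs : ((PySem.Dict.ofList e).get? "preference_type").isSome := by
      rw [← PySem.Dict.contains_eq_isSome_get?]; exact h e (List.mem_cons_self ..)
    obtain ⟨v, hv⟩ := Option.isSome_iff_exists.mp hs
    have hkey : pvKeyB e = v := by simp [pvKeyB, hv]
    simp only [pvLoopA, hv, List.map_cons, hkey]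
    rw [ih _ (fun x hx => h x (List.mem_cons_of_mem _ hx)), pvStepA_keys,
      PySem.Set.update_cons]

-- ===== VERDICT (by name: the statement is the Claim_ definition above) =====
theorem pvLoopA_nodup_keys (l : List (List (String × String)))
    (acc : PySem.Dict String (List (List (String × String))))
    (h : ∀ e ∈ l, (PySem.Dict.ofList e).contains "preference_type" = true)
    (hnd : acc.keys.Nodup) : (pvLoopA l acc).keys.Nodup := by
  rw [pvLoopA_keys l acc h]
  exact PySem.Set.nodup_update _ _ hnd

theorem group_events_by_preference_type_spec : Claim_equal_group_events_by_preference_type := by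
  intro events _ hpre
  unfold Spec_group_events_by_preference_type group_events_by_preference_type
    group_events_by_preference_type_alt
  have hall : events.all (fun e => ((PySem.Dict.ofList e).get? "preference_type").isSome) = true := by
    simp only [List.all_eq_true]
    intro e he
    rw [← PySem.Dict.contains_eq_isSome_get?]; exact hpre e he
  rw [if_pos hall]
  rw [PySem.Dict.items_eq_map_keys _ (pvLoopA_nodup_keys events _ hpre (by simp)) []]
  rw [pvLoopA_keys events _ hpre, PySem.List.dedup_eq_ofList]
  have hupd : PySem.Set.update (PySem.Dict.empty : PySem.Dict String (List (List (String × String)))).keys (events.map pvKeyB)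
      = PySem.Set.ofList (events.map pvKeyB) := by
    simp [PySem.Set.update_nil_left]
  rw [hupd]
  apply List.map_congr_left
  intro k _
  rw [pvLoopA_getD events _ k hpre]
  simp
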